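-- pv_equiv track=rewrite | github.com/Vedantk1301/Sortmeai | backend/main.py | _collect_outfit_labels
-- ===== SOURCE A (Python) =====
-- from typing import Any, Dict, List, Optional
--
-- def _unique(seq: List[str], limit: int = 8) -> List[str]:
--     seen: List[str] = []
--     for item in seq:
--         if not item:
--             continue
--         if item not in seen:
--             seen.append(item)
--         if len(seen) >= limit:
--             break
--     return seen
--
-- def _collect_outfit_labels(outfits: Optional[List[Dict[str, Any]]]) -> List[str]:
--     labels = []
--     for outfit in outfits or []:
--         for key in ("title", "occasion", "vibe"):
--             if outfit.get(key):
--                 labels.append(str(outfit[key]))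
--                 break
--     return _unique(labels, limit=6)
-- ===== SOURCE B (Python) =====
-- from typing import Any, Dict, List, Optional
--
-- def _collect_outfit_labels(outfits: Optional[List[Dict[str, Any]]]) -> List[str]:
--     seen: List[str] = []
--     for outfit in outfits or []:
--         if len(seen) >= 6:
--             break
--         label = ""
--         for key in ("title", "occasion", "vibe"):
--             value = outfit.get(key)
--             if value:
--                 label = str(value)
--                 break
--         if label and label not in seen:
--             seen.append(label)
--     return seen
-- ===== Notes on version B (the rewrite author's own statement) =====
-- stated objective: simpler
-- what changed: Replaces the two-pass build-all-labels-then-_unique pipeline with a single streaming loop that keeps a seen list, skips empty/duplicate labels inline and stops as soon as six labels are collected.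
import Mathlib
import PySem

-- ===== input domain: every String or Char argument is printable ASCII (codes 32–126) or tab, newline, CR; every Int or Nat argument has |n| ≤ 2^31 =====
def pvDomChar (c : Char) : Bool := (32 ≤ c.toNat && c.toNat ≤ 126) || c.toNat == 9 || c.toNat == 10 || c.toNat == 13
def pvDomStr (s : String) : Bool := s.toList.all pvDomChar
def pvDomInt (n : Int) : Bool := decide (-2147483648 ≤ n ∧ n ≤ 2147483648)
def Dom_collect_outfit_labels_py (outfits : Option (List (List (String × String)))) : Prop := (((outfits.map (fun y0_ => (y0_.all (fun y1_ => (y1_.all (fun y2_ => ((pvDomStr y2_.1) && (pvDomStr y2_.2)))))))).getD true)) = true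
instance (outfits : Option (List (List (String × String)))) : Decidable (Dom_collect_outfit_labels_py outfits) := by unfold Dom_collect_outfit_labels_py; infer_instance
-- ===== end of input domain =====

-- B fuses A's build-all-labels pass and the _unique dedup pass into one streaming loop (simpler; same cost).

-- ===== PORT A =====
-- inner 'for key in (...): if outfit.get(key): labels.append(str(outfit[key])); break'
def pvFirstKey (outfit : List (String × String)) : List String → List String → List String
  | [], labels => labels
  | k :: ks, labels =>
    match (PySem.Dict.mk outfit).get? k with
    | some v => if v = "" then pvFirstKey outfit ks labels else labels ++ [v]
    | none => pvFirstKey outfit ks labels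

-- the _unique helper: 'for item in seq: if not item: continue; if item not in seen: append; if len(seen) >= limit: break'
def pvUnique (limit : Nat) : List String → List String → List String
  | [], seen => seen
  | x :: xs, seen =>
    if x = "" then pvUnique limit xs seen
    else
      let seen' := if x ∈ seen then seen else seen ++ [x]
      if limit ≤ seen'.length then seen' else pvUnique limit xs seen'

def collect_outfit_labels_py (outfits : Option (List (List (String × String)))) : List String :=
  let labels := (outfits.getD []).foldl
    (fun labels outfit => pvFirstKey outfit ["title", "occasion", "vibe"] labels) []
  pvUnique 6 labels []

-- ===== PORT B =====
-- 'label = ""; for key in (...): value = outfit.get(key); if value: label = str(value); break'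
def pvLabel (outfit : List (String × String)) : List String → String
  | [] => ""
  | k :: ks =>
    match (PySem.Dict.mk outfit).get? k with
    | some v => if v = "" then pvLabel outfit ks else v
    | none => pvLabel outfit ks

-- the single streaming loop of B over the outfits
def pvBLoop : List (List (String × String)) → List String → List String
  | [], seen => seen
  | o :: os, seen =>
    if 6 ≤ seen.length then seen
    else
      let label := pvLabel o ["title", "occasion", "vibe"]
      pvBLoop os (if label ≠ "" ∧ label ∉ seen then seen ++ [label] else seen)

def collect_outfit_labels_py_alt (outfits : Option (List (List (String × String)))) : List String :=
  pvBLoop (outfits.getD []) []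

-- ===== PRECONDITION & SPEC =====
def Spec_collect_outfit_labels_py (outfits : Option (List (List (String × String)))) (out : List String) : Prop := out = collect_outfit_labels_py_alt outfits
instance (outfits : Option (List (List (String × String)))) (out : List String) : Decidable (Spec_collect_outfit_labels_py outfits out) := by unfold Spec_collect_outfit_labels_py; infer_instance

-- ===== CLAIM (what is proved, stated in full; the proofs are below) =====
def Claim_equal_collect_outfit_labels_py : Prop := ∀ (outfits : Option (List (List (String × String)))), Dom_collect_outfit_labels_py outfits → Spec_collect_outfit_labels_py outfits (collect_outfit_labels_py outfits)

-- ===== LEMMAS AND PROOFS =====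

-- A's inner loop appends exactly B's first-present label (when non-empty)
def pvOptL (outfit : List (String × String)) (ks : List String) : List String :=
  if pvLabel outfit ks = "" then [] else [pvLabel outfit ks]

theorem pvFirstKey_eq_append (outfit : List (String × String)) (ks : List String)
    (labels : List String) :
    pvFirstKey outfit ks labels = labels ++ pvOptL outfit ks := by
  induction ks generalizing labels with
  | nil => simp [pvFirstKey, pvOptL, pvLabel]
  | cons k ks ih =>
    simp only [pvFirstKey, pvOptL, pvLabel]
    cases h : (PySem.Dict.mk outfit).get? k with
    | none => simpa [pvOptL] using ih labels
    | some v =>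
      by_cases hv : v = "" <;> simp [hv, pvOptL] <;> simpa [pvOptL] using ih labels

theorem pvFoldl_eq_flatMap (os : List (List (String × String))) (acc : List String) :
    os.foldl (fun labels outfit => pvFirstKey outfit ["title", "occasion", "vibe"] labels) acc
      = acc ++ os.flatMap (fun o => pvOptL o ["title", "occasion", "vibe"]) := by
  induction os generalizing acc with
  | nil => simp
  | cons o os ih =>
    rw [List.foldl_cons, pvFirstKey_eq_append, ih, List.flatMap_cons, List.append_assoc]

theorem pvBLoop_of_full (os : List (List (String × String))) (seen : List String)
    (h : 6 ≤ seen.length) : pvBLoop os seen = seen := by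
  cases os with
  | nil => rfl
  | cons o os => simp [pvBLoop, h]

theorem pvUnique_flatMap_eq_pvBLoop (os : List (List (String × String)))
    (seen : List String) (h : seen.length < 6) :
    pvUnique 6 (os.flatMap (fun o => pvOptL o ["title", "occasion", "vibe"])) seen
      = pvBLoop os seen := by
  induction os generalizing seen with
  | nil => simp [pvUnique, pvBLoop]
  | cons o os ih =>
    have hns : ¬ 6 ≤ seen.length := by omega
    have hB : pvBLoop (o :: os) seen
        = pvBLoop os (if pvLabel o ["title", "occasion", "vibe"] ≠ "" ∧
              pvLabel o ["title", "occasion", "vibe"] ∉ seen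
            then seen ++ [pvLabel o ["title", "occasion", "vibe"]] else seen) := by
      simp only [pvBLoop, if_neg hns]
    rw [List.flatMap_cons, hB]
    by_cases hl : pvLabel o ["title", "occasion", "vibe"] = ""
    · have h1 : pvOptL o ["title", "occasion", "vibe"] = [] := by simp [pvOptL, hl]
      have h2 : ¬ (pvLabel o ["title", "occasion", "vibe"] ≠ "" ∧
          pvLabel o ["title", "occasion", "vibe"] ∉ seen) := fun hc => hc.1 hl
      rw [h1, List.nil_append, if_neg h2, ih seen h]
    · have h1 : pvOptL o ["title", "occasion", "vibe"]
          = [pvLabel o ["title", "occasion", "vibe"]] := by simp [pvOptL, hl]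
      rw [h1, List.singleton_append]
      simp only [pvUnique, if_neg hl]
      by_cases hmem : pvLabel o ["title", "occasion", "vibe"] ∈ seen
      · have hc : ¬ (pvLabel o ["title", "occasion", "vibe"] ≠ "" ∧
            pvLabel o ["title", "occasion", "vibe"] ∉ seen) := fun hc => hc.2 hmem
        rw [if_pos hmem, if_neg hns, if_neg hc, ih seen h]
      · have hc : pvLabel o ["title", "occasion", "vibe"] ≠ "" ∧
            pvLabel o ["title", "occasion", "vibe"] ∉ seen := ⟨hl, hmem⟩
        rw [if_neg hmem, if_pos hc]
        by_cases hfull : 6 ≤ (seen ++ [pvLabel o ["title", "occasion", "vibe"]]).length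
        · rw [if_pos hfull, pvBLoop_of_full _ _ hfull]
        · rw [if_neg hfull, ih _ (by omega)]

-- ===== VERDICT (by name: the statement is the Claim_ definition above) =====
theorem collect_outfit_labels_py_spec : Claim_equal_collect_outfit_labels_py := by
  intro outfits _
  show collect_outfit_labels_py outfits = collect_outfit_labels_py_alt outfits
  unfold collect_outfit_labels_py collect_outfit_labels_py_alt
  rw [pvFoldl_eq_flatMap, List.nil_append,
    pvUnique_flatMap_eq_pvBLoop _ _ (by simp)]
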